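-- pv_equiv track=rewrite | github.com/pm4py/pm4py-core | pm4py/objects/dfg/utils/dfg_utils.py | infer_end_activities
-- ===== SOURCE A (Python) =====
-- def get_outgoing_edges(dfg):
--     """
--     Gets outgoing edges of the provided DFG graph
--     """
--     outgoing = {}
--     for el in dfg:
--         if type(el[0]) is str:
--             if not el[0] in outgoing:
--                 outgoing[el[0]] = {}
--             outgoing[el[0]][el[1]] = dfg[el]
--         else:
--             if not el[0][0] in outgoing:
--                 outgoing[el[0][0]] = {}
--             outgoing[el[0][0]][el[0][1]] = el[1]
--     return outgoing
--
-- def get_ingoing_edges(dfg):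
--     """
--     Get ingoing edges of the provided DFG graph
--     """
--     ingoing = {}
--     for el in dfg:
--         if type(el[0]) is str:
--             if not el[1] in ingoing:
--                 ingoing[el[1]] = {}
--             ingoing[el[1]][el[0]] = dfg[el]
--         else:
--             if not el[0][1] in ingoing:
--                 ingoing[el[0][1]] = {}
--             ingoing[el[0][1]][el[0][0]] = el[1]
--     return ingoing
--
-- def infer_end_activities(dfg):
--     """
--     Infer end activities from a Directly-Follows Graph
--
--     Parameters
--     ----------
--     dfg
--         Directly-Follows Graph
--
--     Returns
--     ----------
--     end_activities
--         End activities in the log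
--     """
--     ingoing = get_ingoing_edges(dfg)
--     outgoing = get_outgoing_edges(dfg)
--
--     end_activities = []
--
--     for act in ingoing:
--         if act not in outgoing:
--             end_activities.append(act)
--
--     return end_activities
-- ===== SOURCE B (Python) =====
-- def infer_end_activities(dfg):
--     """
--     Infer end activities from a Directly-Follows Graph
--
--     Staged: extract edges, take the set difference targets-set minus
--     sources-set, and recover first-appearance order by sorting on the
--     first index in the target sequence.
--     """
--     edges = [el if type(el[0]) is str else el[0] for el in dfg]
--     sources = {s for s, _ in edges}
--     targets = [t for _, t in edges]
--     return sorted(set(targets) - sources, key=targets.index)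
-- ===== Notes on version B (the rewrite author's own statement) =====
-- stated objective: alternative
-- what changed: Replaces A's two nested-dict helper passes plus an ordered key loop with staged comprehensions computing a set difference (targets minus sources) whose first-appearance order is recovered by sorting on the first index in the target sequence.
import Mathlib
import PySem

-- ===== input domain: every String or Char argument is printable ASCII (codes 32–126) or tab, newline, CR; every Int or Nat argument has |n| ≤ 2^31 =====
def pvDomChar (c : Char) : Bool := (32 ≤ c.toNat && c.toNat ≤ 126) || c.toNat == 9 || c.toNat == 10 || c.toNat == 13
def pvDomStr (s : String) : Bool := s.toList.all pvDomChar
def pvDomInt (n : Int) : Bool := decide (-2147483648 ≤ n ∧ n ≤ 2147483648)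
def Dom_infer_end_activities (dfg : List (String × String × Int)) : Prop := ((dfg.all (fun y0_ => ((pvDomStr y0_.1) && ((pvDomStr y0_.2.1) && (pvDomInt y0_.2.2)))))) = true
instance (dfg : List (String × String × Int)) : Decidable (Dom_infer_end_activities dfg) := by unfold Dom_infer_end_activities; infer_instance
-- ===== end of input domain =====

-- B replaces A's two nested-dict passes plus the final key loop by a set difference
-- (targets minus sources) re-ordered by first index in the target sequence; objective: alternative.
-- Input is a dict {(source, target): count}, encoded as List (String × String × Int);
-- every key is a (str, str) tuple, so A always takes its `type(el[0]) is str` branch.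

-- ===== PORT A =====
-- get_ingoing_edges: ingoing[el[1]][el[0]] = dfg[el]
def pvIngoing (dfg : List (String × String × Int)) : PySem.Dict String (PySem.Dict String Int) :=
  dfg.foldl (fun ing el =>
    let ing1 := if ing.contains el.2.1 then ing else ing.insert el.2.1 PySem.Dict.empty
    ing1.insert el.2.1 ((ing1.getD el.2.1 PySem.Dict.empty).insert el.1 el.2.2))
  PySem.Dict.empty

-- get_outgoing_edges: outgoing[el[0]][el[1]] = dfg[el]
def pvOutgoing (dfg : List (String × String × Int)) : PySem.Dict String (PySem.Dict String Int) :=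
  dfg.foldl (fun outg el =>
    let outg1 := if outg.contains el.1 then outg else outg.insert el.1 PySem.Dict.empty
    outg1.insert el.1 ((outg1.getD el.1 PySem.Dict.empty).insert el.2.1 el.2.2))
  PySem.Dict.empty

def infer_end_activities (dfg : List (String × String × Int)) : List String :=
  (pvIngoing dfg).keys.foldl
    (fun acc act => if !((pvOutgoing dfg).contains act) then acc ++ [act] else acc) []

-- ===== PORT B =====
def infer_end_activities_alt (dfg : List (String × String × Int)) : List String :=
  let edges := dfg.map (fun el => (el.1, el.2.1))
  let sources := PySem.Set.ofList (edges.map (·.1))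
  let targets := edges.map (·.2)
  -- key=targets.index : `.getD 0` is exact here, every sorted element is drawn from set(targets)
  PySem.List.sorted (PySem.Set.diff (PySem.Set.ofList targets) sources)
    (fun t => (PySem.List.index? targets t).getD 0) false

-- ===== PRECONDITION & SPEC =====
def Spec_infer_end_activities (dfg : List (String × String × Int)) (out : List String) : Prop := out = infer_end_activities_alt dfg
instance (dfg : List (String × String × Int)) (out : List String) : Decidable (Spec_infer_end_activities dfg out) := by unfold Spec_infer_end_activities; infer_instance

-- ===== CLAIM =====
def Claim_equal_infer_end_activities : Prop := ∀ (dfg : List (String × String × Int)), Dom_infer_end_activities dfg → Spec_infer_end_activities dfg (infer_end_activities dfg)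

-- ===== LEMMAS AND PROOFS =====

-- A's two-insert step (setdefault-then-write) is one insert at the same key.
theorem pv_step_ingoing (d : PySem.Dict String (PySem.Dict String Int)) (el : String × String × Int) :
    (let d1 := if d.contains el.2.1 then d else d.insert el.2.1 PySem.Dict.empty
     d1.insert el.2.1 ((d1.getD el.2.1 PySem.Dict.empty).insert el.1 el.2.2))
    = d.insert el.2.1 ((d.getD el.2.1 PySem.Dict.empty).insert el.1 el.2.2) := by
  by_cases h : d.contains el.2.1 = true
  · simp [h]
  · simp only [Bool.not_eq_true] at h
    simp [h, PySem.Dict.getD_insert_self, PySem.Dict.insert_insert_self,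
      PySem.Dict.getD_of_not_contains _ _ h]

theorem pv_step_outgoing (d : PySem.Dict String (PySem.Dict String Int)) (el : String × String × Int) :
    (let d1 := if d.contains el.1 then d else d.insert el.1 PySem.Dict.empty
     d1.insert el.1 ((d1.getD el.1 PySem.Dict.empty).insert el.2.1 el.2.2))
    = d.insert el.1 ((d.getD el.1 PySem.Dict.empty).insert el.2.1 el.2.2) := by
  by_cases h : d.contains el.1 = true
  · simp [h]
  · simp only [Bool.not_eq_true] at h
    simp [h, PySem.Dict.getD_insert_self, PySem.Dict.insert_insert_self,
      PySem.Dict.getD_of_not_contains _ _ h]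

theorem pv_ingoing_keys (dfg : List (String × String × Int)) :
    (pvIngoing dfg).keys = PySem.Set.ofList (dfg.map (·.2.1)) := by
  unfold pvIngoing
  have : (dfg.foldl (fun ing el =>
      let ing1 := if ing.contains el.2.1 then ing else ing.insert el.2.1 PySem.Dict.empty
      ing1.insert el.2.1 ((ing1.getD el.2.1 PySem.Dict.empty).insert el.1 el.2.2))
      PySem.Dict.empty)
      = dfg.foldl (fun d el => d.insert el.2.1 ((d.getD el.2.1 PySem.Dict.empty).insert el.1 el.2.2)) PySem.Dict.empty := by
    apply List.foldl_ext
    intro d el _; exact pv_step_ingoing d el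
  rw [this, PySem.Dict.keys_foldl_insert_key]
  simp [PySem.Set.update, PySem.Set.ofList_eq_foldl]

theorem pv_outgoing_keys (dfg : List (String × String × Int)) :
    (pvOutgoing dfg).keys = PySem.Set.ofList (dfg.map (·.1)) := by
  unfold pvOutgoing
  have : (dfg.foldl (fun outg el =>
      let outg1 := if outg.contains el.1 then outg else outg.insert el.1 PySem.Dict.empty
      outg1.insert el.1 ((outg1.getD el.1 PySem.Dict.empty).insert el.2.1 el.2.2))
      PySem.Dict.empty)
      = dfg.foldl (fun d el => d.insert el.1 ((d.getD el.1 PySem.Dict.empty).insert el.2.1 el.2.2)) PySem.Dict.empty := by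
    apply List.foldl_ext
    intro d el _; exact pv_step_outgoing d el
  rw [this, PySem.Dict.keys_foldl_insert_key]
  simp [PySem.Set.update, PySem.Set.ofList_eq_foldl]

-- A equals the filtered deduplicated target list.
theorem pv_A_eq_filter (dfg : List (String × String × Int)) :
    infer_end_activities dfg
    = (PySem.Set.ofList (dfg.map (·.2.1))).filter
        (fun t => !(PySem.Set.contains (PySem.Set.ofList (dfg.map (·.1))) t)) := by
  unfold infer_end_activities
  rw [pv_ingoing_keys,
    PySem.List.foldl_append_if_eq_filter
      (p := fun act => !((pvOutgoing dfg).contains act))]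
  simp only [List.nil_append]
  apply List.filter_congr
  intro t _
  rw [PySem.Dict.contains_eq_decide_mem_keys, pv_outgoing_keys]
  simp [PySem.Set.contains]

-- a member's first index is below the length
theorem pv_idx_lt_len {xs : List String} {a : String} (h : a ∈ xs) :
    (PySem.List.index? xs a).getD 0 < xs.length := by
  have hs : (PySem.List.index? xs a).isSome := (PySem.List.index?_isSome_iff xs a).mpr h
  obtain ⟨k, hk⟩ := Option.isSome_iff_exists.mp hs
  obtain ⟨hlt, -, -⟩ := PySem.List.getElem_of_index?_eq_some hk
  rw [hk]; simpa using hlt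

-- along set(xs), the first index in xs strictly increases
theorem pv_ofList_pairwise_idx (xs : List String) :
    (PySem.Set.ofList xs).Pairwise
      (fun a b => (PySem.List.index? xs a).getD 0 < (PySem.List.index? xs b).getD 0) := by
  induction xs using List.reverseRecOn with
  | nil => simp [PySem.Set.ofList, PySem.Set.empty]
  | append_singleton xs x ih =>
    have hof : PySem.Set.ofList (xs ++ [x]) = PySem.Set.add (PySem.Set.ofList xs) x := by
      simp [PySem.Set.ofList_eq_foldl, List.foldl_append]
    by_cases hx : x ∈ xs
    · have hc : PySem.Set.contains (PySem.Set.ofList xs) x = true := by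
        simp [PySem.Set.contains, PySem.Set.mem_ofList, hx]
      rw [hof]
      unfold PySem.Set.add
      rw [if_pos hc]
      refine ih.imp_of_mem ?_
      intro a b ha hb hab
      have ha' : a ∈ xs := (PySem.Set.mem_ofList xs a).mp ha
      have hb' : b ∈ xs := (PySem.Set.mem_ofList xs b).mp hb
      rwa [PySem.List.index?_append_of_mem _ ha', PySem.List.index?_append_of_mem _ hb']
    · have hc : ¬ PySem.Set.contains (PySem.Set.ofList xs) x = true := by
        simp [PySem.Set.contains, PySem.Set.mem_ofList, hx]
      rw [hof]
      unfold PySem.Set.add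
      rw [if_neg hc]
      rw [List.pairwise_append]
      refine ⟨?_, by simp, ?_⟩
      · refine ih.imp_of_mem ?_
        intro a b ha hb hab
        have ha' : a ∈ xs := (PySem.Set.mem_ofList xs a).mp ha
        have hb' : b ∈ xs := (PySem.Set.mem_ofList xs b).mp hb
        rwa [PySem.List.index?_append_of_mem _ ha', PySem.List.index?_append_of_mem _ hb']
      · intro a ha b hb
        simp only [List.mem_singleton] at hb; subst hb
        have ha' : a ∈ xs := (PySem.Set.mem_ofList xs a).mp ha
        rw [PySem.List.index?_append_of_mem _ ha',
          PySem.List.index?_append_singleton_self xs b hx]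
        simpa using pv_idx_lt_len ha'

theorem pv_A_eq_alt (dfg : List (String × String × Int)) :
    infer_end_activities dfg = infer_end_activities_alt dfg := by
  unfold infer_end_activities_alt
  simp only [List.map_map]
  rw [pv_A_eq_filter]
  unfold PySem.Set.diff
  symm
  apply PySem.List.sorted_eq_of_perm_of_pairwise_lt
  · exact List.Perm.refl _
  · exact (pv_ofList_pairwise_idx (dfg.map (·.2.1))).filter _

-- ===== VERDICT =====
theorem infer_end_activities_spec : Claim_equal_infer_end_activities := by
  intro dfg _
  unfold Spec_infer_end_activities
  exact pv_A_eq_alt dfg
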